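-- pv_equiv track=rewrite | github.com/nobe0716/problem_solving | codeforces/contests/1398/C. Good Subarrays.py | solve
-- ===== SOURCE A (Python) =====
-- from collections import defaultdict
--
-- def solve(n, a):
--     a = list(map(int, a))
--     res = 0
--     s = 0
--     t = defaultdict(int)
--     t[0] = 1
--     for i in range(n):
--         s += a[i]
--         x = s - i - 1
--         t[x] += 1
--         res += (t[x] - 1)
--     return res
-- ===== SOURCE B (Python) =====
-- from collections import Counter
--
-- def solve(n, a):
--     a = list(map(int, a))
--     prefs = [0]
--     for i in range(n):
--         prefs.append(prefs[-1] + a[i] - 1)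
--     cnt = Counter(prefs)
--     return sum(c * (c - 1) // 2 for c in cnt.values())
-- ===== Notes on version B (the rewrite author's own statement) =====
-- stated objective: alternative
-- what changed: A counts pairs incrementally (res += t[x]-1 at each prefix insertion into a running defaultdict); B first tabulates all n+1 prefix sums of a[i]-1 in a list, builds a Counter over them once, and then combines the frequencies with the closed form c*(c-1)//2 per distinct prefix value.
import Mathlib
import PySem

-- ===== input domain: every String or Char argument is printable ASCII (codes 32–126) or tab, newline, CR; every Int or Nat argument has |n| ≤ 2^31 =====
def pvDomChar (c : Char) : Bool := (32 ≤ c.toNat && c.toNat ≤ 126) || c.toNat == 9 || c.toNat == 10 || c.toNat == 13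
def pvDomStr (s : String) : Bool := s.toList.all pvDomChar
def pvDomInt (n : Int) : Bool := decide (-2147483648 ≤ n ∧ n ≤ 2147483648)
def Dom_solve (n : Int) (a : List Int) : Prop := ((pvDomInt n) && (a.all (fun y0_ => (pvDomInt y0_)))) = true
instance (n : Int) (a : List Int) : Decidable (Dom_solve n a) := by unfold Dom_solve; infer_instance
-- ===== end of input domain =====

-- B replaces A's incremental res += t[x]-1 accumulation by tabulating all prefix sums of a[i]-1,
-- counting them once with a Counter, and combining each frequency c with the closed form c*(c-1)//2
-- (objective: alternative decomposition, same asymptotic cost).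

-- ===== PORT A =====
-- (a = list(map(int, a)) is the identity on a List Int argument)
def solve (n : Int) (a : List Int) : Int :=
  ((PySem.List.pyRange 0 n 1).foldl
    (fun (st : Int × Int × PySem.Dict Int Int) (i : Int) =>
      let s := st.2.1 + PySem.List.pyGetD a i 0
      let x := s - i - 1
      let t := st.2.2.insert x (st.2.2.getD x 0 + 1)
      (st.1 + (t.getD x 0 - 1), s, t))
    (0, 0, PySem.Dict.empty.insert 0 1)).1

-- ===== PORT B =====
def solve_alt (n : Int) (a : List Int) : Int :=
  ((PySem.Dict.counter
      ((PySem.List.pyRange 0 n 1).foldl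
        (fun (ps : List Int) (i : Int) =>
          ps ++ [PySem.List.pyGetD ps (-1) 0 + PySem.List.pyGetD a i 0 - 1]) [0])).values.map
    (fun c => PySem.Int.floordiv (c * (c - 1)) 2)).sum

-- ===== PRECONDITION & SPEC =====
-- Pre_ excludes n > len(a), where the Python A (and B) raise IndexError on a[i].
def Pre_solve (n : Int) (a : List Int) : Prop := n ≤ (a.length : Int)
instance (n : Int) (a : List Int) : Decidable (Pre_solve n a) := by unfold Pre_solve; infer_instance
def pvWitness_solve : Int × List Int := (3, [1, 1, 1])

def Spec_solve (n : Int) (a : List Int) (out : Int) : Prop := out = solve_alt n a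
instance (n : Int) (a : List Int) (out : Int) : Decidable (Spec_solve n a out) := by unfold Spec_solve; infer_instance

-- ===== CLAIM (what is proved, stated in full; the proofs are below) =====
def Claim_equal_solve : Prop := ∀ (n : Int) (a : List Int), Dom_solve n a → Pre_solve n a → Spec_solve n a (solve n a)

-- ===== LEMMAS AND PROOFS =====

-- C(c,2) as both programs use it
def pairs (c : Int) : Int := PySem.Int.floordiv (c * (c - 1)) 2

def pairsum (d : PySem.Dict Int Int) : Int := (d.values.map pairs).sum

-- the list of prefix sums of a[i]-1 generated along an index list, starting from p
def kList (a : List Int) : List Int → Int → List Int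
  | [], _ => []
  | i :: l, p =>
      (p + PySem.List.pyGetD a i 0 - 1) :: kList a l (p + PySem.List.pyGetD a i 0 - 1)

-- A's keys written with its own (s, i) state
def kListA (a : List Int) : List Int → Int → List Int
  | [], _ => []
  | i :: l, s => (s + PySem.List.pyGetD a i 0 - i - 1) :: kListA a l (s + PySem.List.pyGetD a i 0)

lemma pairs_succ (c : Int) : pairs (c + 1) = pairs c + c := by
  unfold pairs
  have h2 : (0 : Int) < 2 := by norm_num
  rw [show (c + 1) * ((c + 1) - 1) = c * (c - 1) + c * 2 by ring,
      PySem.Int.floordiv_eq_ediv_of_pos h2, PySem.Int.floordiv_eq_ediv_of_pos h2,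
      Int.add_mul_ediv_right _ _ (by norm_num : (2:Int) ≠ 0)]

-- sum over a nodup list of a function changed at exactly one member
lemma sum_map_update {κ : Type} [DecidableEq κ] (l : List κ) (x : κ) (f g : κ → Int)
    (hx : x ∈ l) (hnd : l.Nodup)
    (hfg : ∀ k ∈ l, k ≠ x → g k = f k) :
    (l.map g).sum = (l.map f).sum + (g x - f x) := by
  induction l with
  | nil => cases hx
  | cons y l ih =>
    rcases List.mem_cons.mp hx with rfl | hx'
    · have : ∀ k ∈ l, g k = f k := by
        intro k hk
        exact hfg k (List.mem_cons_of_mem _ hk) (fun h => (List.nodup_cons.mp hnd).1 (h ▸ hk))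
      simp only [List.map_cons, List.sum_cons, List.map_congr_left this]
      ring
    · have hy : g y = f y :=
        hfg y (List.mem_cons_self) (fun h => (List.nodup_cons.mp hnd).1 (h ▸ hx'))
      simp only [List.map_cons, List.sum_cons, hy,
        ih hx' (List.nodup_cons.mp hnd).2 (fun k hk => hfg k (List.mem_cons_of_mem _ hk))]
      ring

-- one counting insertion raises the pair total by the old count
lemma pairsum_step (d : PySem.Dict Int Int) (x : Int) (hnd : d.keys.Nodup) :
    pairsum (d.insert x (d.getD x 0 + 1)) = pairsum d + d.getD x 0 := by
  unfold pairsum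
  rw [PySem.Dict.values_eq_map_keys d hnd 0,
      PySem.Dict.values_eq_map_keys _ (PySem.Dict.nodup_keys_insert d x _ hnd) 0,
      List.map_map, List.map_map]
  simp only [Function.comp_def]
  by_cases hc : d.contains x = true
  · rw [PySem.Dict.keys_insert_of_contains d _ hc]
    have hx : x ∈ d.keys := (PySem.Dict.contains_iff_mem_keys d x).mp hc
    rw [sum_map_update d.keys x
        (fun k => pairs (d.getD k 0))
        (fun k => pairs ((d.insert x (d.getD x 0 + 1)).getD k 0)) hx hnd
        (fun k _ hk => by
          show pairs ((d.insert x (d.getD x 0 + 1)).getD k 0) = pairs (d.getD k 0)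
          rw [PySem.Dict.getD_insert_of_ne d _ _ hk])]
    rw [PySem.Dict.getD_insert_self, pairs_succ]
    ring
  · have hc' : d.contains x = false := by simpa using hc
    rw [PySem.Dict.keys_insert_of_not_contains d _ hc']
    have hx : x ∉ d.keys := fun h => by
      rw [(PySem.Dict.contains_iff_mem_keys d x).mpr h] at hc'; cases hc'
    have h0 : d.getD x 0 = 0 := PySem.Dict.getD_of_not_contains d 0 hc'
    rw [List.map_append, List.sum_append,
        List.map_congr_left (fun k hk =>
          congrArg pairs (PySem.Dict.getD_insert_of_ne d _ _ (fun (h : k = x) => hx (h ▸ hk))))]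
    rw [List.map_singleton, List.sum_singleton, PySem.Dict.getD_insert_self, h0]
    have hp1 : pairs (0 + 1) = 0 := by decide
    rw [hp1]

-- the incremental res equals the pair-total difference of the counting dict
lemma resfold (ks : List Int) : ∀ (res : Int) (d : PySem.Dict Int Int), d.keys.Nodup →
    (ks.foldl (fun (st : Int × PySem.Dict Int Int) x =>
        (st.1 + st.2.getD x 0, st.2.insert x (st.2.getD x 0 + 1))) (res, d)).1
      = res + pairsum (ks.foldl (fun d x => d.insert x (d.getD x 0 + 1)) d) - pairsum d := by
  induction ks with
  | nil => intro res d _; simp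
  | cons x ks ih =>
    intro res d hnd
    simp only [List.foldl_cons]
    rw [ih _ _ (PySem.Dict.nodup_keys_insert d x _ hnd), pairsum_step d x hnd]
    ring

-- A's fold equals the generic counting fold over A's key list
lemma solveA_fold (a : List Int) (l : List Int) : ∀ (res s : Int) (d : PySem.Dict Int Int),
    (l.foldl
      (fun (st : Int × Int × PySem.Dict Int Int) (i : Int) =>
        let s := st.2.1 + PySem.List.pyGetD a i 0
        let x := s - i - 1
        let t := st.2.2.insert x (st.2.2.getD x 0 + 1)
        (st.1 + (t.getD x 0 - 1), s, t))
      (res, s, d)).1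
    = ((kListA a l s).foldl (fun (st : Int × PySem.Dict Int Int) x =>
        (st.1 + st.2.getD x 0, st.2.insert x (st.2.getD x 0 + 1))) (res, d)).1 := by
  induction l with
  | nil => intro res s d; rfl
  | cons i l ih =>
    intro res s d
    simp only [List.foldl_cons, kListA]
    rw [ih, PySem.Dict.getD_insert_self]
    have h1 : res + (d.getD (s + PySem.List.pyGetD a i 0 - i - 1) 0 + 1 - 1)
        = res + d.getD (s + PySem.List.pyGetD a i 0 - i - 1) 0 := by ring
    rw [h1]

-- on a consecutive index range, A's keys are the prefix sums of a[i]-1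
lemma kListA_eq_kList (a : List Int) (n : Int) : ∀ (m : Nat) (i s p : Int),
    (n - i).toNat = m → p = s - i →
    kListA a (PySem.List.pyRange i n 1) s = kList a (PySem.List.pyRange i n 1) p := by
  intro m
  induction m with
  | zero =>
    intro i s p hm _
    rw [PySem.List.pyRange_one_eq_nil (by omega)]
    rfl
  | succ m ih =>
    intro i s p hm hp
    have hin : i < n := by omega
    subst hp
    rw [PySem.List.pyRange_one_cons hin]
    simp only [kListA, kList]
    congr 1
    · ring
    · have h := ih (i + 1) (s + PySem.List.pyGetD a i 0)
        (s - i + PySem.List.pyGetD a i 0 - 1) (by omega) (by ring)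
      exact h

-- B's prefix loop appends exactly the prefix-sum list
lemma prefs_fold (a : List Int) (l : List Int) : ∀ (ps : List Int) (c : Int), ps ≠ [] →
    PySem.List.pyGetD ps (-1) 0 = c →
    l.foldl (fun (ps : List Int) (i : Int) =>
        ps ++ [PySem.List.pyGetD ps (-1) 0 + PySem.List.pyGetD a i 0 - 1]) ps
      = ps ++ kList a l c := by
  induction l with
  | nil => intro ps c _ _; simp [kList]
  | cons i l ih =>
    intro ps c hne hc
    simp only [List.foldl_cons, kList]
    rw [ih (ps ++ [PySem.List.pyGetD ps (-1) 0 + PySem.List.pyGetD a i 0 - 1])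
          (c + PySem.List.pyGetD a i 0 - 1)
          (by simp)
          (by rw [PySem.List.pyGetD_neg_one_append_singleton, hc])]
    simp [hc]

-- ===== VERDICT (by name: the statement is the Claim_ definition above) =====
theorem solve_spec : Claim_equal_solve := by
  intro n a _ _
  unfold Spec_solve solve solve_alt
  rw [solveA_fold a _ 0 0 _,
      kListA_eq_kList a n (n - 0).toNat 0 0 0 rfl (by ring),
      resfold _ 0 _ (by
        exact PySem.Dict.nodup_keys_insert _ _ _ PySem.Dict.nodup_keys_empty),
      prefs_fold a _ [0] 0 (by simp) (by decide)]
  have hinit : PySem.Dict.empty.insert (0 : Int) (1 : Int)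
      = PySem.Dict.empty.insert (0 : Int) (PySem.Dict.empty.getD (0 : Int) (0 : Int) + 1) := by
    decide
  rw [← PySem.Dict.foldl_insert_getD_add_one_eq_counter]
  show 0 + pairsum _ - pairsum (PySem.Dict.empty.insert 0 1) = pairsum _
  rw [hinit]
  show 0 + pairsum ((kList a (PySem.List.pyRange 0 n 1)
      0).foldl (fun d x => d.insert x (d.getD x 0 + 1))
        (([0] : List Int).foldl (fun (d : PySem.Dict Int Int) x => d.insert x (d.getD x 0 + 1))
          PySem.Dict.empty))
      - pairsum (PySem.Dict.empty.insert 0 (PySem.Dict.empty.getD 0 0 + 1)) = _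
  rw [← List.foldl_append]
  have : pairsum (PySem.Dict.empty.insert (0:Int) (PySem.Dict.empty.getD (0:Int) (0:Int) + 1)) = 0 := by
    decide
  rw [this]
  simp
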